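-- pv_equiv track=rewrite | github.com/emmamrath/gene_annotation_of_structural_variants | create_images_for_deep_learning/images_for_deep_learning_sv03_image_using_non_white_space_mapping_file.py | get_col_numbers_for_col_headings
-- ===== SOURCE A (Python) =====
-- def get_col_numbers_for_col_headings( inline ):
--
-- 	col = {}
-- 	col['chrom'] = -1
-- 	col['pos'] = -1
-- 	col['end'] = -1
-- 	col['svtype'] = -1
-- 	col['svlen'] = -1
-- 	col['tranche2'] = -1
-- 	col['vaf'] = -1
-- 	infields = inline.split("\t")
-- 	for i in range( 0, len(infields) ):
-- 		this_col = infields[i]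
-- 		if (this_col == 'CHROM'):
-- 			col['chrom'] = i
-- 		elif (this_col == 'POS'):
-- 			col['pos'] = i
-- 		elif (this_col == 'END'):
-- 			col['end'] = i
-- 		elif (this_col == 'SVTYPE'):
-- 			col['svtype'] = i
-- 		elif (this_col == 'SVLEN'):
-- 			col['svlen'] = i
-- 		elif (this_col == 'TRANCHE2'):
-- 			col['tranche2'] = i
-- 		elif (this_col == 'VAF'):
-- 			col['vaf'] = i
--
-- 	return col
-- ===== SOURCE B (Python) =====
-- def get_col_numbers_for_col_headings(inline):
--     infields = inline.split("\t")
--     positions = {}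
--     for i, field in enumerate(infields):
--         positions[field] = i
--     col = {}
--     for heading, key in (('CHROM', 'chrom'), ('POS', 'pos'), ('END', 'end'),
--                          ('SVTYPE', 'svtype'), ('SVLEN', 'svlen'),
--                          ('TRANCHE2', 'tranche2'), ('VAF', 'vaf')):
--         col[key] = positions.get(heading, -1)
--     return col
-- ===== Notes on version B (the rewrite author's own statement) =====
-- stated objective: simpler
-- what changed: Replaces the interleaved 7-way if/elif chain inside the scan by two phases: one pass building a field->index table (last assignment wins, matching A's overwrite-with-later-index behaviour), then a lookup pass over a (heading, key) table with -1 as default.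
import Mathlib
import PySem

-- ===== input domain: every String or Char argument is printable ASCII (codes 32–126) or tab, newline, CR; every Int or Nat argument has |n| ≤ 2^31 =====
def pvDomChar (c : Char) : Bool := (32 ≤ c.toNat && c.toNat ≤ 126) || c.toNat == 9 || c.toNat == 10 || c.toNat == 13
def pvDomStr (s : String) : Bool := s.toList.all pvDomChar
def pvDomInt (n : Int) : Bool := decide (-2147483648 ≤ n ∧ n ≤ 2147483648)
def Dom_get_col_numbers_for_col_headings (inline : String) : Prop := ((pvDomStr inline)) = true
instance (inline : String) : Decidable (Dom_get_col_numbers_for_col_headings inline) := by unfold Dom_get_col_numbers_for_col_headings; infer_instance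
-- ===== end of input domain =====

-- B replaces A's interleaved if/elif scan by a one-pass field->index table plus a lookup pass (objective: simpler).

-- ===== PORT A =====
-- loop body of A's for-loop over range(0, len(infields)) (the if/elif chain)
def pvStepA (infields : List String) (col : PySem.Dict String Int) (i : Int) : PySem.Dict String Int :=
  let this_col := PySem.List.pyGetD infields i ""
  if this_col == "CHROM" then col.insert "chrom" i
  else if this_col == "POS" then col.insert "pos" i
  else if this_col == "END" then col.insert "end" i
  else if this_col == "SVTYPE" then col.insert "svtype" i
  else if this_col == "SVLEN" then col.insert "svlen" i
  else if this_col == "TRANCHE2" then col.insert "tranche2" i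
  else if this_col == "VAF" then col.insert "vaf" i
  else col

def get_col_numbers_for_col_headings (inline : String) : List (String × Int) :=
  let col : PySem.Dict String Int :=
    ((((((PySem.Dict.empty.insert "chrom" (-1)).insert "pos" (-1)).insert "end" (-1)).insert
        "svtype" (-1)).insert "svlen" (-1)).insert "tranche2" (-1)).insert "vaf" (-1)
  let infields := (PySem.Str.split? inline "\t").getD []
  let col := (PySem.List.pyRange 0 infields.length 1).foldl (pvStepA infields) col
  col.items

-- ===== PORT B =====
def pvHeadingPairs : List (String × String) :=
  [("CHROM", "chrom"), ("POS", "pos"), ("END", "end"), ("SVTYPE", "svtype"),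
   ("SVLEN", "svlen"), ("TRANCHE2", "tranche2"), ("VAF", "vaf")]

def get_col_numbers_for_col_headings_alt (inline : String) : List (String × Int) :=
  let infields := (PySem.Str.split? inline "\t").getD []
  let positions := (PySem.List.enumerate infields 0).foldl
    (fun d p => d.insert p.2 p.1) (PySem.Dict.empty : PySem.Dict String Int)
  let col := pvHeadingPairs.foldl
    (fun col hk => col.insert hk.2 (positions.getD hk.1 (-1))) (PySem.Dict.empty : PySem.Dict String Int)
  col.items

-- ===== PRECONDITION & SPEC =====
def Spec_get_col_numbers_for_col_headings (inline : String) (out : List (String × Int)) : Prop := out = get_col_numbers_for_col_headings_alt inline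
instance (inline : String) (out : List (String × Int)) : Decidable (Spec_get_col_numbers_for_col_headings inline out) := by unfold Spec_get_col_numbers_for_col_headings; infer_instance

-- ===== CLAIM (what is proved, stated in full; the proofs are below) =====
def Claim_equal_get_col_numbers_for_col_headings : Prop := ∀ (inline : String), Dom_get_col_numbers_for_col_headings inline → Spec_get_col_numbers_for_col_headings inline (get_col_numbers_for_col_headings inline)

-- ===== LEMMAS AND PROOFS =====

-- One step of A's scan changes key's value to i exactly when the field equals key's heading.
theorem pvStepA_getD (infields : List String) (col : PySem.Dict String Int) (i : Int)
    (H key : String) (hmem : (H, key) ∈ pvHeadingPairs) :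
    (pvStepA infields col i).getD key (-1) =
      if PySem.List.pyGetD infields i "" == H then i else col.getD key (-1) := by
  simp only [pvHeadingPairs, List.mem_cons, List.not_mem_nil, or_false] at hmem
  rcases hmem with h|h|h|h|h|h|h <;>
    (cases h; unfold pvStepA; simp only [beq_iff_eq]) <;>
    split_ifs <;> simp_all [PySem.Dict.getD_insert]

-- One step of B's position-table pass, seen at a fixed heading H.
theorem pvStepP_getD (d : PySem.Dict String Int) (p : Int × String) (H : String) :
    ((d.insert p.2 p.1).getD H (-1)) = if p.2 == H then p.1 else d.getD H (-1) := by
  simp only [PySem.Dict.getD_insert, beq_iff_eq]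
  split_ifs <;> simp_all

-- The two folds agree at each (heading, key) pair, whatever the list of (index, field) pairs.
theorem pv_fold_agree (l : List (Int × String)) (H key : String) (hmem : (H, key) ∈ pvHeadingPairs)
    (infields : List String) (dA : PySem.Dict String Int) (dP : PySem.Dict String Int)
    (h : dA.getD key (-1) = dP.getD H (-1))
    (hl : ∀ p ∈ l, p.2 = PySem.List.pyGetD infields p.1 "") :
    ((l.map (·.1)).foldl (pvStepA infields) dA).getD key (-1) =
      (l.foldl (fun d p => d.insert p.2 p.1) dP).getD H (-1) := by
  induction l generalizing dA dP with
  | nil => simpa using h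
  | cons p t ih =>
      simp only [List.map_cons, List.foldl_cons]
      refine ih _ _ ?_ (fun q hq => hl q (List.mem_cons_of_mem _ hq))
      rw [pvStepA_getD infields dA p.1 H key hmem, pvStepP_getD]
      rw [← hl p (List.mem_cons_self)]
      by_cases hEq : p.2 = H <;> simp [hEq, h]

-- A's scan never changes the key set of a dict that already contains the seven keys.
theorem pv_keys_fold (infields : List String) (l : List Int) (d : PySem.Dict String Int)
    (hc : ∀ k ∈ (pvHeadingPairs.map (·.2)), d.contains k = true) :
    (l.foldl (pvStepA infields) d).keys = d.keys := by
  induction l generalizing d with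
  | nil => rfl
  | cons i t ih =>
      have hkeys : (pvStepA infields d i).keys = d.keys := by
        unfold pvStepA
        simp only [beq_iff_eq]
        simp only [pvHeadingPairs, List.map_cons, List.map_nil, List.mem_cons,
          List.not_mem_nil, or_false, forall_eq_or_imp, forall_eq] at hc
        split_ifs <;> simp [PySem.Dict.keys_insert_of_contains, hc]
      have hc' : ∀ k ∈ (pvHeadingPairs.map (·.2)), (pvStepA infields d i).contains k = true := by
        intro k hk
        have := hc k hk
        unfold pvStepA
        simp only [beq_iff_eq]
        split_ifs <;> simp [PySem.Dict.contains_insert, this]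
      rw [List.foldl_cons, ih _ hc', hkeys]

theorem get_col_numbers_spec_aux (inline : String) :
    get_col_numbers_for_col_headings inline = get_col_numbers_for_col_headings_alt inline := by
  unfold get_col_numbers_for_col_headings get_col_numbers_for_col_headings_alt
  set infields := (PySem.Str.split? inline "\t").getD [] with hinf
  set d0 : PySem.Dict String Int :=
    ((((((PySem.Dict.empty.insert "chrom" (-1)).insert "pos" (-1)).insert "end" (-1)).insert
        "svtype" (-1)).insert "svlen" (-1)).insert "tranche2" (-1)).insert "vaf" (-1) with hd0
  set dP := (PySem.List.enumerate infields 0).foldl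
    (fun d p => d.insert p.2 p.1) (PySem.Dict.empty : PySem.Dict String Int) with hdP
  set dA := (PySem.List.pyRange 0 infields.length 1).foldl (pvStepA infields) d0 with hdA
  -- the seven values agree
  have hval : ∀ H key, (H, key) ∈ pvHeadingPairs → dA.getD key (-1) = dP.getD H (-1) := by
    intro H key hmem
    have hrange : PySem.List.pyRange 0 infields.length 1 =
        (PySem.List.enumerate infields 0).map (·.1) := by
      rw [PySem.List.map_fst_enumerate]; norm_num
    have hl : ∀ p ∈ PySem.List.enumerate infields 0, p.2 = PySem.List.pyGetD infields p.1 "" := by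
      intro p hp
      rw [PySem.List.mem_enumerate_iff] at hp
      obtain ⟨k, hk, rfl⟩ := hp
      simp [PySem.List.pyGetD, PySem.List.pyGet?, PySem.List.pyIdx?, hk]
    rw [hdA, hrange]
    exact pv_fold_agree _ H key hmem infields d0 PySem.Dict.empty (by
      simp only [pvHeadingPairs, List.mem_cons, List.not_mem_nil, or_false] at hmem
      rcases hmem with h|h|h|h|h|h|h <;> cases h <;> rfl) hl
  -- A's key list is the seven keys in order
  have hkeys : dA.keys = pvHeadingPairs.map (·.2) := by
    rw [hdA, pv_keys_fold infields _ d0 (by intro k hk; fin_cases hk <;> rfl)]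
    rfl
  have hnd : dA.keys.Nodup := by rw [hkeys]; decide
  -- assemble items
  rw [PySem.Dict.items_eq_map_keys dA hnd (-1), hkeys]
  rw [PySem.Dict.items_foldl_insert_fresh (l := pvHeadingPairs) (k := fun hk => hk.2)
      (v := fun hk => dP.getD hk.1 (-1)) (d := PySem.Dict.empty)
      (fun a _ => rfl) (by decide)]
  have hemp : (PySem.Dict.empty : PySem.Dict String Int).items = [] := rfl
  rw [hemp, List.nil_append, List.map_map]
  apply List.map_congr_left
  intro hk hmem
  simp only [Function.comp_apply]
  rw [hval hk.1 hk.2 (by simpa using hmem)]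

-- ===== VERDICT (by name: the statement is the Claim_ definition above) =====
theorem get_col_numbers_for_col_headings_spec : Claim_equal_get_col_numbers_for_col_headings := by
  intro inline _
  unfold Spec_get_col_numbers_for_col_headings
  exact get_col_numbers_spec_aux inline
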